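-- pv_equiv track=rewrite | github.com/vinoaj/adventofcode-public | src/2024/15/15.py | get_box_pair_coords
-- ===== SOURCE A (Python) =====
-- def get_box_pair_coords(x, y, coords):
--     return sorted(
--         list(
--             set(
--                 [
--                     (cx, cy)
--                     for cx, cy in coords
--                     if (cx, cy) == (x, y)
--                     or (cx, cy) == (x + 1, y)
--                     or (cx, cy) == (x - 1, y)
--                 ]
--             )
--         )
--     )
-- ===== SOURCE B (Python) =====
-- def get_box_pair_coords(x, y, coords):
--     cset = {(cx, cy) for cx, cy in coords}
--     return sorted(p for p in ((x, y), (x + 1, y), (x - 1, y)) if p in cset)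
-- ===== Notes on version B (the rewrite author's own statement) =====
-- stated objective: idiomatic
-- what changed: Instead of scanning coords with a three-way OR chain and deduplicating through set() afterwards, B builds a set index of coords once and iterates over the three fixed candidate points, keeping those present; dedup and the scan over coords disappear from the filtering pass.
import Mathlib
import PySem

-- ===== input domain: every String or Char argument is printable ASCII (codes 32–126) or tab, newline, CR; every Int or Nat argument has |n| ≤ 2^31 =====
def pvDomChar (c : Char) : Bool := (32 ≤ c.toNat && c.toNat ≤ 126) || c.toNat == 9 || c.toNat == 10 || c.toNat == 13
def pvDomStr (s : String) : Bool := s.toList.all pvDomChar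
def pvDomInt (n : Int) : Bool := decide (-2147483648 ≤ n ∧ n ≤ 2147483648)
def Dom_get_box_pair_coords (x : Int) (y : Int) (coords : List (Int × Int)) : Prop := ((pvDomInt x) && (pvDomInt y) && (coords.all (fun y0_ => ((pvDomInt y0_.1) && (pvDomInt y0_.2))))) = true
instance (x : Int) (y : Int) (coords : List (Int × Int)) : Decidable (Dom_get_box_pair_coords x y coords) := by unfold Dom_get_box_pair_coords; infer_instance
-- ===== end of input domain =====

-- B builds a set index of coords and filters the three fixed candidate points, instead of
-- scanning coords with an OR chain and deduplicating afterwards (objective: idiomatic).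


-- ===== PORT A =====
def get_box_pair_coords (x : Int) (y : Int) (coords : List (Int × Int)) : List (Int × Int) :=
  PySem.List.sorted2
    (PySem.Set.ofList
      (coords.filter (fun p =>
        p == (x, y) || p == (x + 1, y) || p == (x - 1, y))))
    Prod.fst Prod.snd

-- ===== PORT B =====
def get_box_pair_coords_alt (x : Int) (y : Int) (coords : List (Int × Int)) : List (Int × Int) :=
  let cset : PySem.Set (Int × Int) := PySem.Set.ofList coords
  PySem.List.sorted2
    ([(x, y), (x + 1, y), (x - 1, y)].filter (fun p => PySem.Set.contains cset p))
    Prod.fst Prod.snd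

-- ===== PRECONDITION & SPEC =====
def Spec_get_box_pair_coords (x : Int) (y : Int) (coords : List (Int × Int)) (out : List (Int × Int)) : Prop := out = get_box_pair_coords_alt x y coords
instance (x : Int) (y : Int) (coords : List (Int × Int)) (out : List (Int × Int)) : Decidable (Spec_get_box_pair_coords x y coords out) := by unfold Spec_get_box_pair_coords; infer_instance

-- ===== CLAIM (what is proved, stated in full; the proofs are below) =====
def Claim_equal_get_box_pair_coords : Prop := ∀ (x : Int) (y : Int) (coords : List (Int × Int)), Dom_get_box_pair_coords x y coords → Spec_get_box_pair_coords x y coords (get_box_pair_coords x y coords)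

-- ===== LEMMAS AND PROOFS =====

-- The canonical answer: the three candidates in increasing order, filtered by membership in coords.
def pvCanon (x : Int) (y : Int) (coords : List (Int × Int)) : List (Int × Int) :=
  [(x - 1, y), (x, y), (x + 1, y)].filter (fun p => decide (p ∈ coords))

theorem pvCanon_nodup (x y : Int) (coords : List (Int × Int)) : (pvCanon x y coords).Nodup := by
  apply List.Nodup.filter
  simp [List.nodup_cons]
  omega

theorem pvCanon_mem (x y : Int) (coords : List (Int × Int)) (p : Int × Int) :
    p ∈ pvCanon x y coords ↔ p ∈ coords ∧ (p = (x, y) ∨ p = (x + 1, y) ∨ p = (x - 1, y)) := by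
  simp [pvCanon, List.mem_filter]
  tauto

-- sorted2 with fst/snd keys is sorted with the lexicographic key.
theorem pvSorted2_eq_lex (xs : List (Int × Int)) :
    PySem.List.sorted2 xs Prod.fst Prod.snd
      = PySem.List.sorted xs (fun p => (toLex p : Int ×ₗ Int)) := by
  have hb : (fun (a b : Int × Int) =>
      decide (a.1 < b.1) || (!decide (b.1 < a.1) && decide (a.2 < b.2)))
      = (fun a b => decide ((toLex a : Int ×ₗ Int) < toLex b)) := by
    funext a b
    have : ((toLex a : Int ×ₗ Int) < toLex b) ↔ a.1 < b.1 ∨ a.1 = b.1 ∧ a.2 < b.2 :=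
      Prod.Lex.lt_iff
    by_cases h1 : a.1 < b.1 <;> by_cases h2 : b.1 < a.1 <;> by_cases h3 : a.2 < b.2 <;>
      simp [h1, h2, h3, this] <;> omega
  simp [PySem.List.sorted2, PySem.List.sorted, hb]

theorem pvCanon_pairwise (x y : Int) (coords : List (Int × Int)) :
    (pvCanon x y coords).Pairwise
      (fun a b => (toLex a : Int ×ₗ Int) < toLex b) := by
  apply List.Pairwise.filter
  simp [Prod.Lex.lt_iff]

theorem pvSorted2_eq_canon (x y : Int) (coords : List (Int × Int)) (xs : List (Int × Int))
    (h : xs.Perm (pvCanon x y coords)) :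
    PySem.List.sorted2 xs Prod.fst Prod.snd = pvCanon x y coords := by
  rw [pvSorted2_eq_lex]
  exact PySem.List.sorted_eq_of_perm_of_pairwise_lt xs (pvCanon x y coords) _
    h.symm (pvCanon_pairwise x y coords)

-- ===== VERDICT (by name: the statement is the Claim_ definition above) =====
theorem get_box_pair_coords_spec : Claim_equal_get_box_pair_coords := by
  intro x y coords _
  unfold Spec_get_box_pair_coords get_box_pair_coords get_box_pair_coords_alt
  have hA : (PySem.Set.ofList
      (coords.filter (fun p =>
        p == (x, y) || p == (x + 1, y) || p == (x - 1, y)))).Perm (pvCanon x y coords) := by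
    rw [List.perm_ext_iff_of_nodup (PySem.Set.nodup_ofList _) (pvCanon_nodup x y coords)]
    intro p
    rw [PySem.Set.mem_ofList, pvCanon_mem]
    simp [List.mem_filter]
    tauto
  have hB : ([(x, y), (x + 1, y), (x - 1, y)].filter
      (fun p => PySem.Set.contains (PySem.Set.ofList coords) p)).Perm (pvCanon x y coords) := by
    rw [List.perm_ext_iff_of_nodup ?_ (pvCanon_nodup x y coords)]
    · intro p
      rw [pvCanon_mem]
      simp [List.mem_filter, PySem.Set.mem_ofList]
      tauto
    · apply List.Nodup.filter
      simp [List.nodup_cons]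
      omega
  rw [pvSorted2_eq_canon x y coords _ hA, pvSorted2_eq_canon x y coords _ hB]
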